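-- pv_equiv track=rewrite | github.com/minahilali117/Pose2Play_BaseModel | ml/form_feedback.py | get_correction_priority
-- ===== SOURCE A (Python) =====
-- from typing import Dict, List
--
-- def get_correction_priority(issues: List[str]) -> List[str]:
--     """
--     Order corrections by priority (most critical first)
--     """
--     priority_order = [
--         'asymmetry',           # Safety concern
--         'knee_valgus',         # Injury risk
--         'forward_lean',        # Injury risk
--         'hip_rotation',        # Compensation pattern
--         'fast_descent',        # Control issue
--         'too_fast',            # Control issue
--         'shallow_depth',       # Effectiveness
--         'insufficient_lift',   # Effectiveness
--         'general_form_issue'   # Generic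
--     ]
--
--     sorted_issues = []
--     for priority_issue in priority_order:
--         if priority_issue in issues:
--             sorted_issues.append(priority_issue)
--
--     # Add any remaining issues
--     for issue in issues:
--         if issue not in sorted_issues:
--             sorted_issues.append(issue)
--
--     return sorted_issues
-- ===== SOURCE B (Python) =====
-- from typing import List
--
-- _PRIORITY = [
--     'asymmetry',
--     'knee_valgus',
--     'forward_lean',
--     'hip_rotation',
--     'fast_descent',
--     'too_fast',
--     'shallow_depth',
--     'insufficient_lift',
--     'general_form_issue',
-- ]
--
-- def get_correction_priority(issues: List[str]) -> List[str]:
--     """Order corrections by priority (most critical first)."""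
--     rank = {name: i for i, name in enumerate(_PRIORITY)}
--     deduped = dict.fromkeys(issues)
--     return sorted(deduped, key=lambda x: rank.get(x, len(_PRIORITY)))
-- ===== Notes on version B (the rewrite author's own statement) =====
-- stated objective: faster
-- what changed: Replaces A's two membership-scanning passes (scan priority_order testing membership in issues, then scan issues testing membership in the growing result list) with a rank table, dict.fromkeys deduplication and one stable sort keyed by rank with a shared constant rank for unknown issues.
import Mathlib
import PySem

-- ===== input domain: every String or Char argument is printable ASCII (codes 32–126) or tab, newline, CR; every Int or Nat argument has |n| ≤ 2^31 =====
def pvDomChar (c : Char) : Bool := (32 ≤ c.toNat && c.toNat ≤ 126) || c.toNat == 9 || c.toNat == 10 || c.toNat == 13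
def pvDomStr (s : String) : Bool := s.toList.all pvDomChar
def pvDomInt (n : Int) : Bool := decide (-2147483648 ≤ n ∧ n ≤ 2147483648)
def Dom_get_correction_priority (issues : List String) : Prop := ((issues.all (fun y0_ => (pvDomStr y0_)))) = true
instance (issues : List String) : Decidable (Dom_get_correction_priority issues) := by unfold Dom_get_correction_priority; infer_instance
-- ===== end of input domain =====

-- B replaces A's two membership-scanning passes with a rank table, first-occurrence
-- deduplication and one stable sort keyed by rank; same return value (objective: faster).

-- the fixed priority list both Pythons carry as a literal
def pvPriority : List String :=
  ["asymmetry", "knee_valgus", "forward_lean", "hip_rotation", "fast_descent",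
   "too_fast", "shallow_depth", "insufficient_lift", "general_form_issue"]

def pvRank : PySem.Dict String Int :=
  (PySem.List.enumerate pvPriority 0).foldl (fun d p => d.insert p.2 p.1) PySem.Dict.empty

-- ===== PORT A =====
def get_correction_priority (issues : List String) : List String :=
  let sorted_issues :=
    pvPriority.foldl (fun acc p => if p ∈ issues then acc ++ [p] else acc) []
  issues.foldl (fun acc issue => if issue ∈ acc then acc else acc ++ [issue]) sorted_issues

-- ===== PORT B =====
-- rank = {name: i for i, name in enumerate(_PRIORITY)}; deduped = dict.fromkeys(issues);
-- sorted(deduped, key=lambda x: rank.get(x, len(_PRIORITY)))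
def get_correction_priority_alt (issues : List String) : List String :=
  PySem.List.sorted (PySem.List.dedup issues)
    (fun x => pvRank.getD x (pvPriority.length : Int)) false

-- ===== PRECONDITION & SPEC =====
def Spec_get_correction_priority (issues : List String) (out : List String) : Prop := out = get_correction_priority_alt issues
instance (issues : List String) (out : List String) : Decidable (Spec_get_correction_priority issues out) := by unfold Spec_get_correction_priority; infer_instance

-- ===== CLAIM (what is proved, stated in full; the proofs are below) =====
def Claim_equal_get_correction_priority : Prop := ∀ (issues : List String), Dom_get_correction_priority issues → Spec_get_correction_priority issues (get_correction_priority issues)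

-- ===== LEMMAS AND PROOFS =====

def pvRankFn (x : String) : Int :=
  if "asymmetry" = x then 0 else if "knee_valgus" = x then 1 else if "forward_lean" = x then 2
  else if "hip_rotation" = x then 3 else if "fast_descent" = x then 4 else if "too_fast" = x then 5
  else if "shallow_depth" = x then 6 else if "insufficient_lift" = x then 7
  else if "general_form_issue" = x then 8 else 9

theorem pvRank_getD (x : String) : pvRank.getD x (pvPriority.length : Int) = pvRankFn x := by
  have h : pvRank = PySem.Dict.mk [("asymmetry",0),("knee_valgus",1),("forward_lean",2),
    ("hip_rotation",3),("fast_descent",4),("too_fast",5),("shallow_depth",6),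
    ("insufficient_lift",7),("general_form_issue",8)] := by rfl
  rw [h]
  simp only [PySem.Dict.getD, PySem.Dict.get?_mk_cons, pvRankFn, pvPriority, beq_iff_eq]
  split_ifs <;> simp_all [PySem.Dict.get?]

theorem insertBy_append {α : Type} (before : α → α → Bool) (x : α) (l1 l2 : List α)
    (h1 : ∀ y ∈ l1, before x y = false) (h2 : ∀ y ∈ l2, before x y = true) :
    PySem.List.insertBy before x (l1 ++ l2) = l1 ++ x :: l2 := by
  induction l1 with
  | nil =>
    cases l2 with
    | nil => simp [PySem.List.insertBy]
    | cons y t => simp [PySem.List.insertBy, h2 y (by simp)]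
  | cons a t ih =>
    have ha := h1 a (by simp)
    simp [PySem.List.insertBy, ha]
    exact ih (fun y hy => h1 y (by simp [hy]))

theorem sorted_buckets {α : Type} (key : α → Int) (ks : List Int) (hks : ks.Pairwise (· < ·)) :
    ∀ (xs : List α), (∀ x ∈ xs, key x ∈ ks) →
    PySem.List.sorted xs key false = ks.flatMap (fun k => xs.filter (fun x => decide (key x = k))) := by
  intro xs
  induction xs using List.reverseRecOn with
  | nil => simp [PySem.List.sorted]
  | append_singleton xs x ih =>
    intro hmem
    have hxs : ∀ y ∈ xs, key y ∈ ks := fun y hy => hmem y (by simp [hy])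
    have hx : key x ∈ ks := hmem x (by simp)
    obtain ⟨ks1, ks2, hsplit⟩ := List.append_of_mem hx
    have hpw := hsplit ▸ hks
    have h1 : ∀ k ∈ ks1, k < key x := by
      intro k hk
      exact (List.pairwise_append.mp hpw).2.2 k hk (key x) (by simp)
    have h2 : ∀ k ∈ ks2, key x < k := by
      have := (List.pairwise_append.mp hpw).2.1
      exact fun k hk => (List.pairwise_cons.mp this).1 k hk
    have hfold : PySem.List.sorted (xs ++ [x]) key false
        = PySem.List.insertBy (fun a b => decide (key a < key b)) x (PySem.List.sorted xs key false) := by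
      rw [PySem.List.sorted_eq_foldl_insertBy, PySem.List.sorted_eq_foldl_insertBy, List.foldl_append]
      rfl
    rw [hfold, ih hxs, hsplit]
    have hins : PySem.List.insertBy (fun a b => decide (key a < key b)) x
        ((ks1 ++ key x :: ks2).flatMap (fun k => xs.filter (fun x => decide (key x = k))))
        = (ks1.flatMap (fun k => xs.filter (fun y => decide (key y = k)))
            ++ xs.filter (fun y => decide (key y = key x)))
          ++ x :: ks2.flatMap (fun k => xs.filter (fun y => decide (key y = k))) := by
      rw [List.flatMap_append, List.flatMap_cons, ← List.append_assoc]
      apply insertBy_append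
      · intro y hy
        simp only [List.mem_append, List.mem_flatMap, List.mem_filter] at hy
        rcases hy with ⟨k, hk, _, hky⟩ | ⟨_, hky⟩
        · have := h1 k hk
          simp at hky; simp [hky]; omega
        · simp at hky; simp [hky]
      · intro y hy
        simp only [List.mem_flatMap, List.mem_filter] at hy
        obtain ⟨k, hk, _, hky⟩ := hy
        have := h2 k hk
        simp at hky; simp [hky]; omega
    rw [hins]
    rw [List.flatMap_append, List.flatMap_cons]
    have m1 : ks1.flatMap (fun k => List.filter (fun y => decide (key y = k)) (xs ++ [x]))
        = ks1.flatMap (fun k => List.filter (fun y => decide (key y = k)) xs) := by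
      apply List.flatMap_congr
      intro k hk
      rw [List.filter_append]
      have : ¬ (key x = k) := by have := h1 k hk; omega
      simp [this]
    have m2 : ks2.flatMap (fun k => List.filter (fun y => decide (key y = k)) (xs ++ [x]))
        = ks2.flatMap (fun k => List.filter (fun y => decide (key y = k)) xs) := by
      apply List.flatMap_congr
      intro k hk
      rw [List.filter_append]
      have : ¬ (key x = k) := by have := h2 k hk; omega
      simp [this]
    have mm : List.filter (fun y => decide (key y = key x)) (xs ++ [x])
        = List.filter (fun y => decide (key y = key x)) xs ++ [x] := by
      rw [List.filter_append]; simp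
    rw [m1, m2, mm]
    simp [List.append_assoc]

-- first-occurrence dedup skipping anything in `seen`
def pvDdf (seen : List String) : List String → List String
  | [] => []
  | x :: t => if x ∈ seen then pvDdf seen t else x :: pvDdf (x :: seen) t

theorem pvDdf_congr (xs : List String) : ∀ (s s' : List String), (∀ a, a ∈ s ↔ a ∈ s') →
    pvDdf s xs = pvDdf s' xs := by
  induction xs with
  | nil => intro s s' _; rfl
  | cons x t ih =>
    intro s s' h
    by_cases hx : x ∈ s
    · simp [pvDdf, hx, (h x).mp hx, ih s s' h]
    · have hx' : x ∉ s' := fun hc => hx ((h x).mpr hc)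
      simp [pvDdf, hx, hx']
      exact ih _ _ (fun a => by simp [h a])

theorem pvFoldl_ddf (xs : List String) : ∀ (s : List String),
    xs.foldl (fun acc issue => if issue ∈ acc then acc else acc ++ [issue]) s = s ++ pvDdf s xs := by
  induction xs with
  | nil => simp [pvDdf]
  | cons x t ih =>
    intro s
    by_cases hx : x ∈ s
    · simp [pvDdf, hx, ih s]
    · simp only [List.foldl_cons, pvDdf, hx, if_false]
      rw [ih (s ++ [x])]
      rw [pvDdf_congr t (s ++ [x]) (x :: s) (fun a => by simp; tauto)]
      simp

theorem pvDdf_filter (xs : List String) : ∀ (s : List String),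
    pvDdf s xs = (pvDdf [] xs).filter (fun x => decide (x ∉ s)) := by
  induction xs with
  | nil => intro s; rfl
  | cons x t ih =>
    intro s
    have hnil : pvDdf [] (x :: t) = x :: pvDdf [x] t := by simp [pvDdf]
    have hxt : pvDdf [x] t = (pvDdf [] t).filter (fun a => decide (a ∉ ([x] : List String))) := ih [x]
    by_cases hx : x ∈ s
    · have hl : pvDdf s (x :: t) = pvDdf s t := by simp [pvDdf, hx]
      rw [hl, ih s, hnil, List.filter_cons]
      simp only [hx, not_true_eq_false, decide_false, Bool.false_eq_true, if_false, hxt,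
        List.filter_filter]
      apply List.filter_congr
      intro a _
      by_cases hax : a = x
      · subst hax; simp [hx]
      · simp [hax]
    · have hl : pvDdf s (x :: t) = x :: pvDdf (x :: s) t := by simp [pvDdf, hx]
      rw [hl, hnil, List.filter_cons]
      simp only [hx, not_false_eq_true, decide_true, if_true]
      congr 1
      rw [ih (x :: s), hxt, List.filter_filter]
      apply List.filter_congr
      intro a _
      by_cases hax : a = x
      · subst hax; simp
      · by_cases has : a ∈ s <;> simp [hax, has]

theorem pvDedup_eq_ddf (xs : List String) : PySem.List.dedup xs = pvDdf [] xs := by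
  have h : ∀ (s : List String), xs.foldl PySem.Set.add s
      = xs.foldl (fun acc issue => if issue ∈ acc then acc else acc ++ [issue]) s := by
    induction xs with
    | nil => intro s; rfl
    | cons x t ih =>
      intro s
      simp only [List.foldl_cons, PySem.Set.add]
      rw [ih]
      congr 1
      simp
  show xs.foldl PySem.Set.add [] = _
  rw [h, pvFoldl_ddf]
  simp

theorem pvFilter_eq_single (a : String) (l : List String) (h : l.Nodup) :
    l.filter (fun x => decide (x = a)) = if a ∈ l then [a] else [] := by
  induction l with
  | nil => rfl
  | cons x t ih =>
    rw [List.filter_cons]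
    rcases List.nodup_cons.mp h with ⟨hx, ht⟩
    by_cases hxa : x = a
    · subst hxa
      simp [ih ht, hx]
    · simp [hxa, ih ht, Ne.symm hxa]

theorem pvFoldl_filter (issues : List String) (l : List String) : ∀ (acc : List String),
    l.foldl (fun acc p => if p ∈ issues then acc ++ [p] else acc) acc
      = acc ++ l.filter (fun p => decide (p ∈ issues)) := by
  induction l with
  | nil => simp
  | cons p t ih =>
    intro acc
    by_cases hp : p ∈ issues
    · simp [hp, ih]
    · simp [hp, ih]

theorem pvFilter_cons_append {α : Type} (p : α → Bool) (a : α) (l : List α) :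
    List.filter p (a :: l) = (if p a = true then [a] else []) ++ List.filter p l := by
  rw [List.filter_cons]; split <;> rfl

theorem pvMain (issues : List String) :
    get_correction_priority issues = get_correction_priority_alt issues := by
  have hkey : (fun x => pvRank.getD x (pvPriority.length : Int)) = pvRankFn :=
    funext pvRank_getD
  have hrange : ∀ x : String, pvRankFn x ∈ ([0,1,2,3,4,5,6,7,8,9] : List Int) := by
    intro x; unfold pvRankFn; split_ifs <;> simp
  have hB : get_correction_priority_alt issues
      = ([0,1,2,3,4,5,6,7,8,9] : List Int).flatMap
          (fun k => (PySem.List.dedup issues).filter (fun x => decide (pvRankFn x = k))) := by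
    unfold get_correction_priority_alt
    rw [hkey]
    exact sorted_buckets pvRankFn _ (by decide) _ (fun x _ => hrange x)
  have hbucket : ∀ (k : Int) (p : String),
      (∀ x : String, pvRankFn x = k ↔ x = p) →
      (PySem.List.dedup issues).filter (fun x => decide (pvRankFn x = k))
        = if p ∈ issues then [p] else [] := by
    intro k p hiff
    rw [List.filter_congr (q := fun x => decide (x = p)) (fun a _ => by simp only [decide_eq_decide]; exact hiff a)]
    rw [pvFilter_eq_single p _ (PySem.List.nodup_dedup issues)]
    simp
  have hiffs : ∀ x : String,
      (pvRankFn x = 0 ↔ x = "asymmetry") ∧ (pvRankFn x = 1 ↔ x = "knee_valgus") ∧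
      (pvRankFn x = 2 ↔ x = "forward_lean") ∧ (pvRankFn x = 3 ↔ x = "hip_rotation") ∧
      (pvRankFn x = 4 ↔ x = "fast_descent") ∧ (pvRankFn x = 5 ↔ x = "too_fast") ∧
      (pvRankFn x = 6 ↔ x = "shallow_depth") ∧ (pvRankFn x = 7 ↔ x = "insufficient_lift") ∧
      (pvRankFn x = 8 ↔ x = "general_form_issue") ∧ (pvRankFn x = 9 ↔ x ∉ pvPriority) := by
    intro x
    unfold pvRankFn
    split_ifs <;> subst_vars <;> simp_all [pvPriority, eq_comm]
  have h9 : (PySem.List.dedup issues).filter (fun x => decide (pvRankFn x = 9))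
      = (PySem.List.dedup issues).filter (fun x => decide (x ∉ pvPriority)) := by
    apply List.filter_congr
    intro a _
    simp only [decide_eq_decide]
    exact (hiffs a).2.2.2.2.2.2.2.2.2
  have hA : get_correction_priority issues
      = pvPriority.filter (fun p => decide (p ∈ issues))
        ++ (PySem.List.dedup issues).filter (fun x => decide (x ∉ pvPriority)) := by
    unfold get_correction_priority
    rw [pvFoldl_filter, pvFoldl_ddf, pvDdf_filter, ← pvDedup_eq_ddf]
    simp only [List.nil_append]
    congr 1
    apply List.filter_congr
    intro a ha
    have hai : a ∈ issues := (PySem.List.mem_dedup issues a).mp ha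
    simp only [decide_eq_decide, List.mem_filter]
    constructor
    · intro h hc; exact h (by simp [hc, hai])
    · intro h hc; exact h hc.1
  rw [hA, hB]
  rw [List.flatMap_cons, List.flatMap_cons, List.flatMap_cons, List.flatMap_cons,
      List.flatMap_cons, List.flatMap_cons, List.flatMap_cons, List.flatMap_cons,
      List.flatMap_cons, List.flatMap_cons, List.flatMap_nil]
  rw [hbucket 0 "asymmetry" (fun x => (hiffs x).1),
      hbucket 1 "knee_valgus" (fun x => (hiffs x).2.1),
      hbucket 2 "forward_lean" (fun x => (hiffs x).2.2.1),
      hbucket 3 "hip_rotation" (fun x => (hiffs x).2.2.2.1),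
      hbucket 4 "fast_descent" (fun x => (hiffs x).2.2.2.2.1),
      hbucket 5 "too_fast" (fun x => (hiffs x).2.2.2.2.2.1),
      hbucket 6 "shallow_depth" (fun x => (hiffs x).2.2.2.2.2.2.1),
      hbucket 7 "insufficient_lift" (fun x => (hiffs x).2.2.2.2.2.2.2.1),
      hbucket 8 "general_form_issue" (fun x => (hiffs x).2.2.2.2.2.2.2.2.1),
      h9]
  simp only [pvPriority, pvFilter_cons_append, List.filter_nil, decide_eq_true_eq,
    List.append_nil, List.append_assoc]

-- ===== VERDICT (by name: the statement is the Claim_ definition above) =====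
theorem get_correction_priority_spec : Claim_equal_get_correction_priority := by
  intro issues _
  exact pvMain issues
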